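-- pv_equiv track=rewrite | github.com/Toussaint5/HeteroVulnGNN | data_processor.py | parse_slither_text_output
-- ===== SOURCE A (Python) =====
-- from typing import Dict, List, Optional
--
-- def parse_slither_text_output(text: str) -> List[Dict]:
--     """Parse Slither text output."""
--     detectors = []
--
--     # Look for patterns indicating issues
--     lines = text.split('\n')
--     current_issue = None
--
--     for line in lines:
--         # Slither often uses color codes and specific formatting
--         if 'Reference:' in line or 'Check:' in line:
--             if current_issue:
--                 detectors.append(current_issue)
--
--             current_issue = {
--                 'check': line.split(':')[-1].strip() if ':' in line else 'unknown',
--                 'impact': 'Medium',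
--                 'confidence': 'Medium',
--                 'description': ''
--             }
--         elif current_issue and line.strip():
--             current_issue['description'] += line.strip() + ' '
--
--     if current_issue:
--         detectors.append(current_issue)
--
--     return detectors
-- ===== SOURCE B (Python) =====
-- def parse_slither_text_output(text):
--     """Parse Slither text output (two-phase: cut into header/body blocks, then build records)."""
--     def is_header(line):
--         return 'Reference:' in line or 'Check:' in line
--
--     lines = text.split('\n')
--     # phase 1: skip the preamble, then cut into (header, body) blocks
--     i = 0
--     while i < len(lines) and not is_header(lines[i]):
--         i += 1
--     blocks = []
--     while i < len(lines):
--         j = i + 1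
--         while j < len(lines) and not is_header(lines[j]):
--             j += 1
--         blocks.append((lines[i], lines[i + 1:j]))
--         i = j
--     # phase 2: one record per block
--     return [
--         {
--             'check': header.split(':')[-1].strip(),
--             'impact': 'Medium',
--             'confidence': 'Medium',
--             'description': ''.join(s + ' ' for s in
--                                    [l.strip() for l in body if l.strip()]),
--         }
--         for header, body in blocks
--     ]
-- ===== Notes on version B (the rewrite author's own statement) =====
-- stated objective: alternative
-- what changed: B replaces A's single fold that mutates a current-issue dict (appending to its description in place) by two separate phases: first cut the line list into (header, body-lines) blocks, then map each block to its record, building the description with a join over the stripped non-blank body lines.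
import Mathlib
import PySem

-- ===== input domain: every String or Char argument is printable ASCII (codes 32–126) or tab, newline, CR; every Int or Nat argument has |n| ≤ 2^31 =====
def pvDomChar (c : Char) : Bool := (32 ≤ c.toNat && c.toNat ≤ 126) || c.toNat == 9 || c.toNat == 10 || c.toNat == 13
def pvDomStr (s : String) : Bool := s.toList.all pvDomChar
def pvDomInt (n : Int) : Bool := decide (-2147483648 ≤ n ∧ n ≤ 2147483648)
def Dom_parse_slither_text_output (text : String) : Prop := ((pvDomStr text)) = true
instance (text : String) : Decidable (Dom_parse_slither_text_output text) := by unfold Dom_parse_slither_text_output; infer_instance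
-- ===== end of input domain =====

-- B re-implements the parse in two phases (cut into header/body blocks, then map each block to a record)
-- instead of A's single fold mutating a current-issue accumulator; same return value, objective: alternative decomposition.

-- ===== PORT A =====
-- A's loop body: state = (finished issues, optional current issue)
def pvStepA (st : List (PySem.Dict String String) × Option (PySem.Dict String String))
    (line : String) : List (PySem.Dict String String) × Option (PySem.Dict String String) :=
  if PySem.Str.isIn "Reference:" line || PySem.Str.isIn "Check:" line then
    ((match st.2 with | some d => st.1 ++ [d] | none => st.1),
     some (PySem.Dict.ofList [
       ("check", if PySem.Str.isIn ":" line then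
                   -- line.split(':')[-1]: split output is never empty, so the [-1] default "" is unreachable
                   PySem.Str.strip (PySem.List.pyGetD ((PySem.Str.split? line ":").getD []) (-1) "")
                 else "unknown"),
       ("impact", "Medium"), ("confidence", "Medium"), ("description", "")]))
  else
    match st.2 with
    | some d =>
        if !(PySem.Str.strip line == "") then
          (st.1, some (d.insert "description" (d.getD "description" "" ++ PySem.Str.strip line ++ " ")))
        else st
    | none => st

def parse_slither_text_output (text : String) : List (List (String × String)) :=
  -- text.split('\n'): separator "\n" ≠ "", so split? is never none
  let lines := (PySem.Str.split? text "\n").getD []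
  let st := lines.foldl pvStepA ([], none)
  (match st.2 with | some d => st.1 ++ [d] | none => st.1).map PySem.Dict.items

-- ===== PORT B =====
def pvIsHeader (line : String) : Bool :=
  PySem.Str.isIn "Reference:" line || PySem.Str.isIn "Check:" line

-- phase 1 inner loop: each block = (header line, lines up to the next header)
def pvBlocks : List String → List (String × List String)
  | [] => []
  | h :: rest =>
      (h, rest.takeWhile (fun l => !pvIsHeader l)) ::
        pvBlocks (rest.dropWhile (fun l => !pvIsHeader l))
termination_by ls => ls.length
decreasing_by simpa using Nat.lt_succ_of_le (List.length_dropWhile_le _ rest)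

-- phase 2: one record per block
def pvRecord (blk : String × List String) : List (String × String) :=
  [("check", PySem.Str.strip (PySem.List.pyGetD ((PySem.Str.split? blk.1 ":").getD []) (-1) "")),
   ("impact", "Medium"), ("confidence", "Medium"),
   ("description", PySem.Str.join ""
     (((blk.2.filter (fun l => !(PySem.Str.strip l == ""))).map PySem.Str.strip).map (fun s => s ++ " ")))]

def parse_slither_text_output_alt (text : String) : List (List (String × String)) :=
  let lines := (PySem.Str.split? text "\n").getD []
  (pvBlocks (lines.dropWhile (fun l => !pvIsHeader l))).map pvRecord

-- ===== PRECONDITION & SPEC =====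
def Spec_parse_slither_text_output (text : String) (out : List (List (String × String))) : Prop := out = parse_slither_text_output_alt text
instance (text : String) (out : List (List (String × String))) : Decidable (Spec_parse_slither_text_output text out) := by unfold Spec_parse_slither_text_output; infer_instance

-- ===== CLAIM (what is proved, stated in full; the proofs are below) =====
def Claim_equal_parse_slither_text_output : Prop := ∀ (text : String), Dom_parse_slither_text_output text → Spec_parse_slither_text_output text (parse_slither_text_output text)

-- ===== LEMMAS AND PROOFS =====

-- A's current issue after accumulating description acc under check c
def pvMkA (c acc : String) : PySem.Dict String String :=
  PySem.Dict.mk [("check", c), ("impact", "Medium"), ("confidence", "Medium"), ("description", acc)]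

-- A's finalization step
def pvFin (st : List (PySem.Dict String String) × Option (PySem.Dict String String)) :
    List (List (String × String)) :=
  (match st.2 with | some d => st.1 ++ [d] | none => st.1).map PySem.Dict.items

-- B's description of a body
def pvDesc (body : List String) : String :=
  PySem.Str.join "" (((body.filter (fun l => !(PySem.Str.strip l == ""))).map PySem.Str.strip).map (fun s => s ++ " "))

lemma pvOfList4 (c acc : String) :
    PySem.Dict.ofList [("check", c), ("impact", "Medium"), ("confidence", "Medium"), ("description", acc)]
      = pvMkA c acc := rfl

lemma pvGetD_desc (c acc : String) : (pvMkA c acc).getD "description" "" = acc := rfl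

lemma pvInsert_desc (c acc v : String) : (pvMkA c acc).insert "description" v = pvMkA c v := rfl

lemma pvJoin_empty_cons (x : String) (rest : List String) :
    PySem.Str.join "" (x :: rest) = x ++ PySem.Str.join "" rest := by
  cases rest with
  | nil => simp [PySem.Str.join]
  | cons y ys => simp [PySem.Str.join, PySem.Chars.join_cons_cons]

lemma pvJoin_nil : PySem.Str.join "" [] = "" := rfl

lemma pvDesc_nil : pvDesc [] = "" := rfl

lemma pvDesc_cons (l : String) (body : List String) :
    pvDesc (l :: body) =
      if PySem.Str.strip l == "" then pvDesc body
      else PySem.Str.strip l ++ " " ++ pvDesc body := by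
  by_cases h : PySem.Str.strip l == "" <;>
    simp [pvDesc, h, pvJoin_empty_cons]

lemma pvBlocks_nil : pvBlocks [] = [] := by rw [pvBlocks.eq_def]

lemma pvBlocks_cons (h : String) (rest : List String) :
    pvBlocks (h :: rest) =
      (h, rest.takeWhile (fun l => !pvIsHeader l)) ::
        pvBlocks (rest.dropWhile (fun l => !pvIsHeader l)) := by rw [pvBlocks.eq_def]

lemma pvHdr_colon (l : String) (h : pvIsHeader l = true) : PySem.Str.isIn ":" l = true := by
  rw [PySem.Str.isIn_iff_infix]
  rcases Bool.or_eq_true_iff.1 (by simpa [pvIsHeader] using h) with h' | h' <;>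
    exact List.IsInfix.trans (by decide) ((PySem.Chars.isIn_iff_infix _ _).1 h')

lemma pvGoSome (ls : List String) (dets : List (PySem.Dict String String)) (c acc : String) :
    pvFin (ls.foldl pvStepA (dets, some (pvMkA c acc))) =
      dets.map PySem.Dict.items ++
        [("check", c), ("impact", "Medium"), ("confidence", "Medium"),
         ("description", acc ++ pvDesc (ls.takeWhile (fun l => !pvIsHeader l)))] ::
        (pvBlocks (ls.dropWhile (fun l => !pvIsHeader l))).map pvRecord := by
  induction ls generalizing dets c acc with
  | nil => simp [pvFin, pvMkA, pvDesc_nil, pvBlocks_nil]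
  | cons l ls ih =>
    by_cases hh : pvIsHeader l = true
    · have hc := pvHdr_colon l hh
      have hstep : pvStepA (dets, some (pvMkA c acc)) l =
          (dets ++ [pvMkA c acc],
           some (pvMkA (PySem.Str.strip
             (PySem.List.pyGetD ((PySem.Str.split? l ":").getD []) (-1) "")) "")) := by
        have hh' := hh; simp only [pvIsHeader] at hh'
        simp only [pvStepA, hh', hc, if_true, pvOfList4]
      rw [List.foldl_cons, hstep, ih]
      simp [hh, pvRecord, pvBlocks_cons, pvMkA, pvDesc, pvJoin_nil]
    · by_cases hb : (PySem.Str.strip l == "") = true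
      · have hstep : pvStepA (dets, some (pvMkA c acc)) l = (dets, some (pvMkA c acc)) := by
          have hh' := hh; simp [pvIsHeader] at hh'
          simp [pvStepA, hh'.1, hh'.2, hb]
        rw [List.foldl_cons, hstep, ih]
        simp [hh, pvDesc_cons, hb]
      · have hstep : pvStepA (dets, some (pvMkA c acc)) l =
            (dets, some (pvMkA c (acc ++ PySem.Str.strip l ++ " "))) := by
          have hh' := hh; simp [pvIsHeader] at hh'
          simp [pvStepA, hh'.1, hh'.2, hb, pvGetD_desc, pvInsert_desc]
        rw [List.foldl_cons, hstep, ih]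
        simp [hh, pvDesc_cons, hb, String.append_assoc]

lemma pvGoNone (ls : List String) (dets : List (PySem.Dict String String)) :
    pvFin (ls.foldl pvStepA (dets, none)) =
      dets.map PySem.Dict.items ++
        (pvBlocks (ls.dropWhile (fun l => !pvIsHeader l))).map pvRecord := by
  induction ls generalizing dets with
  | nil => simp [pvFin, pvBlocks_nil]
  | cons l ls ih =>
    by_cases hh : pvIsHeader l = true
    · have hc := pvHdr_colon l hh
      have hstep : pvStepA (dets, none) l =
          (dets,
           some (pvMkA (PySem.Str.strip
             (PySem.List.pyGetD ((PySem.Str.split? l ":").getD []) (-1) "")) "")) := by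
        have hh' := hh; simp only [pvIsHeader] at hh'
        simp only [pvStepA, hh', hc, if_true, pvOfList4]
      rw [List.foldl_cons, hstep, pvGoSome]
      simp [hh, pvRecord, pvBlocks_cons, pvDesc]
    · have hstep : pvStepA (dets, none) l = (dets, none) := by
        have hh' := hh; simp [pvIsHeader] at hh'
        simp [pvStepA, hh'.1, hh'.2]
      rw [List.foldl_cons, hstep, ih]
      simp [hh]

-- ===== VERDICT (by name: the statement is the Claim_ definition above) =====
theorem parse_slither_text_output_spec : Claim_equal_parse_slither_text_output := by
  intro text _
  unfold Spec_parse_slither_text_output parse_slither_text_output parse_slither_text_output_alt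
  simpa [pvFin] using pvGoNone ((PySem.Str.split? text "\n").getD []) []
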